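-- pv_equiv track=rewrite | github.com/Mobilecomm-a-UST/backend-code | Soft_AT_Nokia/views.py | matches_path
-- ===== SOURCE A (Python) =====
-- def matches_path(expected_path, dist_name):
--     expected_parts = [p.split('-')[0].lower() for p in expected_path.split('/')]
--     dist_parts = [p.split('-')[0].lower() for p in dist_name.split('/')]
--     idx = 0
--     for part in dist_parts:
--         if idx < len(expected_parts) and part == expected_parts[idx]:
--             idx += 1
--     return idx == len(expected_parts)
-- ===== SOURCE B (Python) =====
-- def matches_path(expected_path, dist_name):
--     expected_parts = [p.split('-')[0].lower() for p in expected_path.split('/')]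
--     dist_parts = [p.split('-')[0].lower() for p in dist_name.split('/')]
--     positions = {}
--     for i, p in enumerate(dist_parts):
--         positions.setdefault(p, []).append(i)
--     cur = -1
--     for part in expected_parts:
--         nxt = next((k for k in positions.get(part, []) if k > cur), None)
--         if nxt is None:
--             return False
--         cur = nxt
--     return True
-- ===== Notes on version B (the rewrite author's own statement) =====
-- stated objective: alternative
-- what changed: Instead of A's single greedy scan over dist_parts with an integer match-pointer, B first builds a dictionary mapping each normalized part to the ascending list of its positions in dist_parts, then walks expected_parts keeping a cursor and doing a successor search (first stored position greater than the cursor) in each part's position list.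
import Mathlib
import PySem

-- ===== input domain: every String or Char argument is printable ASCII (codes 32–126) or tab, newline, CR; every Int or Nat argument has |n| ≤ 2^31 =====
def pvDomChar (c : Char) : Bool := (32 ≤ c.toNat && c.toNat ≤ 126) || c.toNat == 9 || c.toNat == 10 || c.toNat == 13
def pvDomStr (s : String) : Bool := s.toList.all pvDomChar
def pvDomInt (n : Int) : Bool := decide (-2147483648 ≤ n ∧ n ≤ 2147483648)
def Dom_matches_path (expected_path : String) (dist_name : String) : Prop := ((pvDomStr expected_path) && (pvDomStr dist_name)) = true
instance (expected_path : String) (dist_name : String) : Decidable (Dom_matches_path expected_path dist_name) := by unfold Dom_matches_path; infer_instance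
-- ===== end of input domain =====

-- B replaces A's single greedy index scan over dist_parts by a different algorithm:
-- it builds an occurrence-index dictionary (part -> ascending list of its positions
-- in dist_parts) in one pass, then walks expected_parts doing a successor search in
-- each part's position list (objective: alternative; same asymptotic cost).

-- ===== PORT A =====
-- '[p.split('-')[0].lower() for p in s.split('/')]' — identical line in both Pythons.
-- splitOn never returns [], so Python's '[0]' is exactly headD.
def pvParts (s : String) : List (List Char) :=
  (PySem.Chars.splitOn s.toList ['/']).map
    (fun p => PySem.Chars.lower ((PySem.Chars.splitOn p ['-']).headD []))

def matches_path (expected_path : String) (dist_name : String) : Bool :=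
  let expected_parts := pvParts expected_path
  let dist_parts := pvParts dist_name
  let idx := dist_parts.foldl
    (fun idx part =>
      if idx < expected_parts.length ∧ part = expected_parts.getD idx [] then idx + 1 else idx) 0
  decide (idx = expected_parts.length)

-- ===== PORT B =====
-- 'positions.setdefault(p, []).append(i)' = modify with default [] appending i.
def pvPositions (ds : List (List Char)) : PySem.Dict (List Char) (List Int) :=
  (PySem.List.enumerate ds).foldl (fun d ip => d.modify ip.2 [] (fun l => l ++ [ip.1])) PySem.Dict.empty

-- 'next((k for k in l if k > cur), None)'
def pvNext (cur : Int) : List Int → Option Int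
  | [] => none
  | k :: ks => if cur < k then some k else pvNext cur ks

-- B's main loop over expected_parts with the cursor cur
def pvWalk (pos : PySem.Dict (List Char) (List Int)) : List (List Char) → Int → Bool
  | [], _ => true
  | p :: ps, cur =>
    match pvNext cur (pos.getD p []) with
    | none => false
    | some nxt => pvWalk pos ps nxt

def matches_path_alt (expected_path : String) (dist_name : String) : Bool :=
  let expected_parts := pvParts expected_path
  let dist_parts := pvParts dist_name
  pvWalk (pvPositions dist_parts) expected_parts (-1)

-- ===== PRECONDITION & SPEC =====
def Spec_matches_path (expected_path : String) (dist_name : String) (out : Bool) : Prop := out = matches_path_alt expected_path dist_name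
instance (expected_path : String) (dist_name : String) (out : Bool) : Decidable (Spec_matches_path expected_path dist_name out) := by unfold Spec_matches_path; infer_instance

-- ===== CLAIM (what is proved, stated in full; the proofs are below) =====
def Claim_equal_matches_path : Prop := ∀ (expected_path : String) (dist_name : String), Dom_matches_path expected_path dist_name → Spec_matches_path expected_path dist_name (matches_path expected_path dist_name)

-- ===== LEMMAS AND PROOFS =====

-- Intermediate greedy subsequence scan (proof device only, used by both directions).
def pvConsume (part : List Char) : List (List Char) → Option (List (List Char))
  | [] => none
  | d :: rest => if d = part then some rest else pvConsume part rest

def pvAllIn : List (List Char) → List (List Char) → Bool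
  | [], _ => true
  | p :: ps, ds =>
    match pvConsume p ds with
    | none => false
    | some rest => pvAllIn ps rest

-- occurrence indices of p in ds, ascending, as Ints
def occI : List (List Char) → List Char → List Int
  | [], _ => []
  | d :: ds, p => (if d = p then [(0:Int)] else []) ++ (occI ds p).map (· + 1)

theorem occI_nonneg (ds : List (List Char)) (p : List Char) :
    ∀ k ∈ occI ds p, 0 ≤ k := by
  induction ds with
  | nil => simp [occI]
  | cons d ds ih =>
    intro k hk
    simp only [occI, List.mem_append, List.mem_map] at hk
    rcases hk with hk | ⟨x, hx, rfl⟩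
    · split at hk <;> simp_all
    · have := ih x hx; omega

theorem occI_snoc (ds : List (List Char)) (d p : List Char) :
    occI (ds ++ [d]) p = occI ds p ++ (if d = p then [((ds.length : Int))] else []) := by
  induction ds with
  | nil => by_cases h : d = p <;> simp [occI, h]
  | cons e ds ih =>
    simp only [List.cons_append, occI, ih, List.map_append, List.append_assoc]
    by_cases h : d = p <;> simp [h]

theorem pvPositions_getD (ds : List (List Char)) (p : List Char) :
    (pvPositions ds).getD p [] = occI ds p := by
  induction ds using List.reverseRecOn with
  | nil => simp [pvPositions, PySem.List.enumerate, occI]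
  | append_singleton ds d ih =>
    unfold pvPositions at ih ⊢
    rw [PySem.List.enumerate_append, List.foldl_append]
    simp only [PySem.List.enumerate_cons, PySem.List.enumerate_nil, List.foldl_cons, List.foldl_nil]
    rw [occI_snoc]
    by_cases h : d = p
    · subst h
      rw [PySem.Dict.getD_modify_self, ih]
      simp
    · rw [PySem.Dict.getD_modify_of_ne]
      · simp [ih, h]
      · exact fun hc => h hc.symm

theorem pvNext_eq_head_filter (cur : Int) (l : List Int) :
    pvNext cur l = (l.filter (fun k => decide (cur < k))).head? := by
  induction l with
  | nil => simp [pvNext]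
  | cons k ks ih =>
    by_cases h : cur < k <;> simp [pvNext, h, ih]

theorem filter_occI_drop (p : List Char) (c : Nat) (ds : List (List Char)) :
    (occI ds p).filter (fun k => decide ((c : Int) - 1 < k))
      = (occI (ds.drop c) p).map (· + (c : Int)) := by
  induction c generalizing ds with
  | zero =>
    rw [List.filter_eq_self.mpr]
    · simp
    · intro k hk
      have := occI_nonneg ds p k hk
      simp; omega
  | succ c ih =>
    cases ds with
    | nil => simp [occI]
    | cons d ds =>
      simp only [occI, List.filter_append, List.filter_map, List.drop_succ_cons]
      rw [show (List.filter (fun k => decide (((c+1 : Nat) : Int) - 1 < k))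
            (if d = p then [(0:Int)] else [])) = [] from ?_,
          show ((fun k => decide (((c+1 : Nat) : Int) - 1 < k)) ∘ (· + 1))
            = (fun k => decide ((c : Int) - 1 < k)) from ?_]
      · rw [ih ds, List.map_map, List.nil_append]
        congr 1
        funext k
        simp only [Function.comp_apply]
        push_cast
        ring
      · funext k
        simp only [Function.comp_apply]
        congr 1
        simp only [eq_iff_iff]
        push_cast
        omega
      · split
        · simp only [List.filter_cons, List.filter_nil]
          rw [if_neg]
          simp only [decide_eq_true_eq]
          push_cast
          omega
        · simp

theorem pvConsume_occI (p : List Char) (ds : List (List Char)) :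
    (occI ds p = [] → pvConsume p ds = none) ∧
    (∀ n t, occI ds p = n :: t → 0 ≤ n ∧ pvConsume p ds = some (ds.drop (n.toNat + 1))) := by
  induction ds with
  | nil => simp [occI, pvConsume]
  | cons d ds ih =>
    by_cases h : d = p
    · refine ⟨?_, ?_⟩
      · intro hocc; simp [occI, h] at hocc
      · intro n t hocc
        simp only [occI, if_pos h, List.singleton_append, List.cons.injEq] at hocc
        obtain ⟨rfl, -⟩ := hocc
        simp [pvConsume, h]
    · simp only [occI, if_neg h, List.nil_append]
      refine ⟨?_, ?_⟩
      · intro hocc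
        rw [List.map_eq_nil_iff] at hocc
        simp [pvConsume, h, ih.1 hocc]
      · intro n t hocc
        cases hocc' : occI ds p with
        | nil => rw [hocc'] at hocc; simp at hocc
        | cons n' t' =>
          rw [hocc'] at hocc
          simp only [List.map_cons, List.cons.injEq] at hocc
          obtain ⟨rfl, -⟩ := hocc
          obtain ⟨hn', hc⟩ := ih.2 n' t' hocc'
          refine ⟨by omega, ?_⟩
          simp only [pvConsume, if_neg h, hc]
          congr 1
          have : (n' + 1).toNat = n'.toNat + 1 := by omega
          rw [this, List.drop_succ_cons]

theorem pvWalk_eq_pvAllIn (ds : List (List Char)) (es : List (List Char)) (c : Nat) :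
    pvWalk (pvPositions ds) es ((c : Int) - 1) = pvAllIn es (ds.drop c) := by
  induction es generalizing c with
  | nil => simp [pvWalk, pvAllIn]
  | cons p ps ih =>
    simp only [pvWalk, pvAllIn, pvPositions_getD, pvNext_eq_head_filter, filter_occI_drop]
    cases hocc : occI (ds.drop c) p with
    | nil =>
      rw [(pvConsume_occI p (ds.drop c)).1 hocc]
      simp
    | cons n t =>
      obtain ⟨hn, hc⟩ := (pvConsume_occI p (ds.drop c)).2 n t hocc
      rw [hc]
      simp only [List.map_cons, List.head?_cons]
      have harg : n + (c : Int) = ((c + n.toNat + 1 : Nat) : Int) - 1 := by push_cast; omega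
      have hdrop : (ds.drop c).drop (n.toNat + 1) = ds.drop (c + n.toNat + 1) := by
        rw [List.drop_drop]; ring_nf
      rw [harg, ih (c + n.toNat + 1), hdrop]

-- A's loop state idx, viewed through the suffix es.drop idx, computes the greedy scan.
theorem pvLoop_eq (ds es : List (List Char)) (idx : Nat) (h : idx ≤ es.length) :
    (ds.foldl
      (fun idx part => if idx < es.length ∧ part = es.getD idx [] then idx + 1 else idx) idx
        = es.length)
      ↔ pvAllIn (es.drop idx) ds = true := by
  induction ds generalizing idx with
  | nil =>
    simp only [List.foldl_nil]
    rcases Nat.lt_or_ge idx es.length with hlt | hge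
    · have hdrop : es.drop idx = es[idx] :: es.drop (idx + 1) := (List.getElem_cons_drop hlt).symm
      rw [hdrop]
      simp [pvAllIn, pvConsume]
      omega
    · have : idx = es.length := le_antisymm h hge
      subst this
      simp [List.drop_length, pvAllIn]
  | cons d ds ih =>
    simp only [List.foldl_cons]
    rcases Nat.lt_or_ge idx es.length with hlt | hge
    · have hdrop : es.drop idx = es[idx] :: es.drop (idx + 1) := (List.getElem_cons_drop hlt).symm
      have hget : es.getD idx [] = es[idx] := List.getD_eq_getElem es [] hlt
      by_cases hd : d = es[idx]
      · rw [if_pos ⟨hlt, by rw [hget]; exact hd⟩, hdrop]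
        rw [ih (idx + 1) hlt]
        simp [pvAllIn, pvConsume, hd]
      · rw [if_neg (by rw [hget]; exact fun hc => hd hc.2), hdrop]
        rw [ih idx h, hdrop]
        cases hrest : es.drop (idx + 1) with
        | nil => simp [pvAllIn, pvConsume, hd]
        | cons x xs => simp [pvAllIn, pvConsume, hd]
    · have : idx = es.length := le_antisymm h hge
      subst this
      rw [if_neg (fun hc => absurd hc.1 (lt_irrefl _))]
      rw [ih es.length (le_refl _)]
      simp [List.drop_length, pvAllIn]

-- ===== VERDICT (by name: the statement is the Claim_ definition above) =====
theorem matches_path_spec : Claim_equal_matches_path := by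
  intro ep dn _
  unfold Spec_matches_path matches_path matches_path_alt
  have hA := pvLoop_eq (pvParts dn) (pvParts ep) 0 (Nat.zero_le _)
  have hB := pvWalk_eq_pvAllIn (pvParts dn) (pvParts ep) 0
  simp only [List.drop_zero] at hA hB
  norm_num at hB
  rw [hB]
  cases hb : pvAllIn (pvParts ep) (pvParts dn)
  · simp only [decide_eq_false_iff_not, hA, hb]
    exact Bool.false_ne_true
  · simp only [decide_eq_true_eq, hA, hb]
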